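-- pv_equiv track=rewrite | github.com/dannypark95/bgg-serverless-etl-pipeline | validation/dedupe_parents_in_db.py | dedupe_parents
-- ===== SOURCE A (Python) =====
-- def dedupe_parents(parents: list) -> list:
--     """Keep one entry per parent_id, preferring longer parent_name."""
--     by_id = {}
--     for p in parents or []:
--         pid = p.get("parent_id", "")
--         pname = p.get("parent_name", "")
--         if pid and len(pname) > len(by_id.get(pid, "")):
--             by_id[pid] = pname
--     return [{"parent_id": p, "parent_name": n} for p, n in by_id.items()]
-- ===== SOURCE B (Python) =====
-- def dedupe_parents(parents: list) -> list:
--     """Keep one entry per parent_id, preferring longer parent_name."""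
--     valid = []
--     for p in parents or []:
--         pid = p.get("parent_id", "")
--         pname = p.get("parent_name", "")
--         if pid and pname:
--             valid.append((pid, pname))
--     seen = []
--     out = []
--     for pid, _ in valid:
--         if pid not in seen:
--             seen.append(pid)
--             out.append({"parent_id": pid,
--                         "parent_name": max([n for q, n in valid if q == pid], key=len)})
--     return out
-- ===== Notes on version B (the rewrite author's own statement) =====
-- stated objective: alternative
-- what changed: Replaces A's single-pass running-best dict by a dict-free two-stage pass: first collect the valid (pid, name) pairs, then emit one row per first-seen pid (tracked in a plain 'seen' list) whose name is max(key=len) over all of that pid's names, whose first-maximal rule reproduces A's strict-> tie behaviour.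
import Mathlib
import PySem

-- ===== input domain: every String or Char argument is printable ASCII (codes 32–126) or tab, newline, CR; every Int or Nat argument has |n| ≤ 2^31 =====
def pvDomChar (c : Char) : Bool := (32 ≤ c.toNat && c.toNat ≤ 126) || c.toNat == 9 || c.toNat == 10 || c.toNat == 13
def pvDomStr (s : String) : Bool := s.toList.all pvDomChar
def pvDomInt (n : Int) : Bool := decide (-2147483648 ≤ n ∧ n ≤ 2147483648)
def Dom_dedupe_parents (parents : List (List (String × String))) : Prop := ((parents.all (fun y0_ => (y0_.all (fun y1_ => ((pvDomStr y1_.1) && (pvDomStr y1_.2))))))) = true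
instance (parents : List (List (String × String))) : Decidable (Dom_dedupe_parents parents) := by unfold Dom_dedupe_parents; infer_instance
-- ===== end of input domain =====

-- B replaces A's single-pass running-best dict by a dict-free two-stage pass: collect the valid
-- (pid, name) pairs, then emit one row per first-seen pid (a 'seen' list) whose name is
-- max(key=len) over ALL of that pid's names; alternative shape, not faster.

-- ===== PORT A =====
-- p.get(k, dflt) on an association-list dict (first match), shared by both ports
def pvGet (p : List (String × String)) (k dflt : String) : String :=
  (PySem.Dict.mk p).getD k dflt

-- one iteration of A's loop body
def pvStepA (d : PySem.Dict String String) (p : List (String × String)) : PySem.Dict String String :=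
  let pid := pvGet p "parent_id" ""
  let pname := pvGet p "parent_name" ""
  if pid ≠ "" ∧ PySem.Str.len (d.getD pid "") < PySem.Str.len pname then d.insert pid pname else d

def dedupe_parents (parents : List (List (String × String))) : List (List (String × String)) :=
  let by_id := parents.foldl pvStepA PySem.Dict.empty
  by_id.items.map (fun q => [("parent_id", q.1), ("parent_name", q.2)])

-- ===== PORT B =====
-- max(names, key=len): PySem.List.maxD, first longest name (the list is never empty in B)
def pvFm (ns : List String) : String := PySem.List.maxD ns PySem.Str.len ""

-- B's first loop: collect the valid (pid, pname) pairs
def pvValid (parents : List (List (String × String))) : List (String × String) :=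
  parents.foldl (fun valid p =>
    let pid := pvGet p "parent_id" ""
    let pname := pvGet p "parent_name" ""
    if pid ≠ "" ∧ pname ≠ "" then valid ++ [(pid, pname)] else valid) []

def dedupe_parents_alt (parents : List (List (String × String))) : List (List (String × String)) :=
  let valid := pvValid parents
  (valid.foldl (fun (st : List String × List (List (String × String))) r =>
      if r.1 ∈ st.1 then st
      else (st.1 ++ [r.1],
            st.2 ++ [[("parent_id", r.1),
                      ("parent_name", pvFm ((valid.filter (fun s => s.1 == r.1)).map Prod.snd))]]))
    ([], [])).2

-- ===== PRECONDITION & SPEC =====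
def Spec_dedupe_parents (parents : List (List (String × String))) (out : List (List (String × String))) : Prop := out = dedupe_parents_alt parents
instance (parents : List (List (String × String))) (out : List (List (String × String))) : Decidable (Spec_dedupe_parents parents out) := by unfold Spec_dedupe_parents; infer_instance

-- ===== CLAIM (what is proved, stated in full; the proofs are below) =====
def Claim_equal_dedupe_parents : Prop := ∀ (parents : List (List (String × String))), Dom_dedupe_parents parents → Spec_dedupe_parents parents (dedupe_parents parents)

-- ===== LEMMAS AND PROOFS =====

-- the valid list, recursively (proof-side view of pvValid)
def pvVR : List (List (String × String)) → List (String × String)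
  | [] => []
  | p :: ps =>
    (if pvGet p "parent_id" "" ≠ "" ∧ pvGet p "parent_name" "" ≠ ""
     then [(pvGet p "parent_id" "", pvGet p "parent_name" "")] else []) ++ pvVR ps

-- A's loop body as a step over a valid pair
def pvStep2 (d : PySem.Dict String String) (r : String × String) : PySem.Dict String String :=
  if PySem.Str.len (d.getD r.1 "") < PySem.Str.len r.2 then d.insert r.1 r.2 else d

-- all names of pid p in v
def pvNames (v : List (String × String)) (p : String) : List String :=
  (v.filter (fun s => s.1 == p)).map Prod.snd

-- the pids of v not in seen, in first-occurrence order
def pvNew (seen : List String) : List (String × String) → List String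
  | [] => []
  | r :: v => if r.1 ∈ seen then pvNew seen v else r.1 :: pvNew (seen ++ [r.1]) v

-- the common specification: per first-seen pid, its longest name
def pvSpec (v : List (String × String)) : List (String × String) :=
  (pvNew [] v).map (fun p => (p, pvFm (pvNames v p)))

theorem pvLen_nonneg (x : String) : 0 ≤ PySem.Str.len x := by
  simp [PySem.Str.len]

theorem pvLen_pos_of_ne (x : String) (h : x ≠ "") : 0 < PySem.Str.len x := by
  simp only [PySem.Str.len]
  have hnil : x.toList ≠ [] := by
    intro hnil
    exact h (by simpa using congrArg String.ofList hnil)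
  exact_mod_cast List.length_pos_iff.mpr hnil

theorem pvEq_empty_of_len_nonpos (x : String) (h : ¬ 0 < PySem.Str.len x) : x = "" := by
  by_contra hne
  exact h (pvLen_pos_of_ne x hne)

theorem pvFm_append (ns : List String) (x : String) :
    pvFm (ns ++ [x]) = if PySem.Str.len (pvFm ns) < PySem.Str.len x then x else pvFm ns := by
  unfold pvFm PySem.List.maxD PySem.List.max?
  rw [List.foldl_append]
  generalize List.foldl _ none ns = r
  cases r with
  | none =>
      simp only [List.foldl_cons, List.foldl_nil]
      split
      · rfl
      · next hno => exact pvEq_empty_of_len_nonpos x (by simpa [PySem.Str.len] using hno)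
  | some m =>
      simp only [List.foldl_cons, List.foldl_nil, Option.getD_some]
      split <;> simp_all

theorem pvValid_foldl (parents : List (List (String × String)))
    (acc : List (String × String)) :
    parents.foldl (fun valid p =>
      let pid := pvGet p "parent_id" ""
      let pname := pvGet p "parent_name" ""
      if pid ≠ "" ∧ pname ≠ "" then valid ++ [(pid, pname)] else valid) acc
    = acc ++ pvVR parents := by
  induction parents generalizing acc with
  | nil => simp [pvVR]
  | cons p ps ih =>
      simp only [List.foldl_cons, pvVR]
      split
      · rw [ih]; simp
      · rw [ih]; simp

theorem pvValid_eq (parents : List (List (String × String))) :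
    pvValid parents = pvVR parents := by
  unfold pvValid
  simpa using pvValid_foldl parents []

theorem pvVR_ok (parents : List (List (String × String))) :
    ∀ r ∈ pvVR parents, r.1 ≠ "" ∧ r.2 ≠ "" := by
  induction parents with
  | nil => simp [pvVR]
  | cons p ps ih =>
      intro r hr
      simp only [pvVR, List.mem_append] at hr
      rcases hr with hr | hr
      · split at hr
        · next hc => simp only [List.mem_singleton] at hr; subst hr; exact hc
        · cases hr
      · exact ih r hr

-- A's fold over parents is A's step over the valid pairs
theorem pvA_fold (parents : List (List (String × String))) (d : PySem.Dict String String) :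
    parents.foldl pvStepA d = (pvVR parents).foldl pvStep2 d := by
  induction parents generalizing d with
  | nil => simp [pvVR]
  | cons p ps ih =>
      simp only [List.foldl_cons, pvVR, List.foldl_append]
      by_cases hc : pvGet p "parent_id" "" ≠ "" ∧ pvGet p "parent_name" "" ≠ ""
      · rw [if_pos hc]
        simp only [List.foldl_cons, List.foldl_nil]
        rw [ih]
        congr 1
        unfold pvStepA pvStep2
        simp only
        split
        · next h => rw [if_pos h.2]
        · next h =>
            rw [if_neg]
            intro hlt
            exact h ⟨hc.1, hlt⟩
      · rw [if_neg hc]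
        simp only [List.foldl_nil]
        rw [ih]
        congr 1
        unfold pvStepA
        simp only
        rw [if_neg]
        intro hcond
        by_cases hpn : pvGet p "parent_name" "" = ""
        · rw [hpn] at hcond
          have h0 := pvLen_nonneg ((d.getD (pvGet p "parent_id" "") ""))
          have hz : PySem.Str.len "" = 0 := rfl
          omega
        · exact hc ⟨hcond.1, hpn⟩

theorem pvMem_pvNew (v : List (String × String)) (seen : List String) (p : String) :
    p ∈ pvNew seen v ↔ p ∉ seen ∧ p ∈ v.map Prod.fst := by
  induction v generalizing seen with
  | nil => simp [pvNew]
  | cons r v ih =>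
      simp only [pvNew, List.map_cons, List.mem_cons]
      by_cases hm : r.1 ∈ seen
      · rw [if_pos hm, ih]
        constructor
        · rintro ⟨hns, hmem⟩; exact ⟨hns, Or.inr hmem⟩
        · rintro ⟨hns, hmem⟩
          refine ⟨hns, ?_⟩
          rcases hmem with h | h
          · subst h; exact absurd hm hns
          · exact h
      · rw [if_neg hm]
        simp only [List.mem_cons, ih, List.mem_append]
        constructor
        · rintro (h | ⟨hns, hmem⟩)
          · subst h; exact ⟨hm, Or.inl rfl⟩
          · exact ⟨fun hs => hns (Or.inl hs), Or.inr hmem⟩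
        · rintro ⟨hns, h | h⟩
          · exact Or.inl h
          · by_cases hpr : p = r.1
            · exact Or.inl hpr
            · exact Or.inr ⟨fun hs => (by rcases hs with hs | hs; exact hns hs; exact hpr (by simpa using hs)), h⟩

theorem pvNew_nodup (v : List (String × String)) (seen : List String) :
    (pvNew seen v).Nodup := by
  induction v generalizing seen with
  | nil => simp [pvNew]
  | cons r v ih =>
      simp only [pvNew]
      split
      · exact ih seen
      · refine List.nodup_cons.mpr ⟨?_, ih (seen ++ [r.1])⟩
        intro hmem
        have := (pvMem_pvNew v (seen ++ [r.1]) r.1).mp hmem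
        exact this.1 (by simp)

theorem pvNew_append (v : List (String × String)) (q : String × String) (seen : List String) :
    pvNew seen (v ++ [q])
      = pvNew seen v ++ (if q.1 ∈ seen ∨ q.1 ∈ v.map Prod.fst then [] else [q.1]) := by
  induction v generalizing seen with
  | nil => simp [pvNew]
  | cons r v ih =>
      simp only [List.cons_append, pvNew, List.map_cons]
      by_cases hm : r.1 ∈ seen
      · rw [if_pos hm, if_pos hm, ih]
        congr 1
        by_cases hq : q.1 ∈ seen ∨ q.1 ∈ v.map Prod.fst
        · rw [if_pos hq, if_pos (hq.imp id (fun h => List.mem_cons_of_mem _ h))]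
        · rw [if_neg hq, if_neg]
          rintro (h | h)
          · exact hq (Or.inl h)
          · rcases List.mem_cons.mp h with h | h
            · exact hq (Or.inl (h ▸ hm))
            · exact hq (Or.inr h)
      · rw [if_neg hm, if_neg hm, ih]
        simp only [List.cons_append]
        congr 2
        by_cases hq : q.1 ∈ seen ++ [r.1] ∨ q.1 ∈ v.map Prod.fst
        · rw [if_pos hq, if_pos]
          rcases hq with h | h
          · rcases List.mem_append.mp h with h | h
            · exact Or.inl h
            · exact Or.inr (List.mem_cons.mpr (Or.inl (by simpa using h)))
          · exact Or.inr (List.mem_cons_of_mem _ h)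
        · rw [if_neg hq, if_neg]
          rintro (h | h)
          · exact hq (Or.inl (List.mem_append_left _ h))
          · rcases List.mem_cons.mp h with h | h
            · exact hq (Or.inl (List.mem_append_right _ (by simpa using h)))
            · exact hq (Or.inr h)

theorem pvNames_append (v : List (String × String)) (q : String × String) (p : String) :
    pvNames (v ++ [q]) p = pvNames v p ++ (if q.1 == p then [q.2] else []) := by
  unfold pvNames
  rw [List.filter_append, List.map_append]
  congr 1
  by_cases h : q.1 == p <;> simp [List.filter, h]

theorem pvNames_nil (v : List (String × String)) (p : String)
    (h : p ∉ v.map Prod.fst) : pvNames v p = [] := by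
  unfold pvNames
  rw [List.filter_eq_nil_iff.mpr, List.map_nil]
  intro r hr hbeq
  exact h (List.mem_map.mpr ⟨r, hr, by simpa using hbeq⟩)

theorem pvSpec_keys (v : List (String × String)) :
    (pvSpec v).map Prod.fst = pvNew [] v := by
  unfold pvSpec
  rw [List.map_map]
  exact (List.map_congr_left fun p _ => rfl).trans (List.map_id _)

-- A's dict after folding the valid pairs has exactly the spec as its items
theorem pvA_items (v : List (String × String)) (hok : ∀ r ∈ v, r.1 ≠ "" ∧ r.2 ≠ "") :
    (v.foldl pvStep2 PySem.Dict.empty).items = pvSpec v := by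
  induction v using List.reverseRecOn with
  | nil => simp [pvSpec, pvNew, PySem.Dict.empty]
  | append_singleton v q ih =>
      have hokv : ∀ r ∈ v, r.1 ≠ "" ∧ r.2 ≠ "" := fun r hr => hok r (by simp [hr])
      have hq := hok q (by simp)
      have hitems := ih hokv
      set d := v.foldl pvStep2 PySem.Dict.empty with hd
      have hkeys : d.keys = pvNew [] v := by
        show d.items.map Prod.fst = _
        rw [hitems]; exact pvSpec_keys v
      have hknd : d.keys.Nodup := by rw [hkeys]; exact pvNew_nodup v []
      rw [List.foldl_append, List.foldl_cons, List.foldl_nil, ← hd]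
      unfold pvStep2
      by_cases hmem : q.1 ∈ v.map Prod.fst
      · -- q.1 already present: the entry's longest name gets updated (or kept)
        have hmemN : q.1 ∈ pvNew [] v := (pvMem_pvNew v [] q.1).mpr ⟨by simp, hmem⟩
        have hentry : (q.1, pvFm (pvNames v q.1)) ∈ d.items := by
          rw [hitems]
          exact List.mem_map.mpr ⟨q.1, hmemN, rfl⟩
        have hgd : d.getD q.1 "" = pvFm (pvNames v q.1) :=
          PySem.Dict.getD_of_mem_items d hentry hknd ""
        have hcont : d.contains q.1 = true := by
          rw [PySem.Dict.contains_iff_mem_keys, hkeys]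
          · exact hmemN
        have hspec : pvSpec (v ++ [q])
            = (pvNew [] v).map (fun p => (p, pvFm (pvNames (v ++ [q]) p))) := by
          unfold pvSpec
          rw [pvNew_append, if_pos (Or.inr hmem), List.append_nil]
        rw [hgd, hspec]
        by_cases hlt : PySem.Str.len (pvFm (pvNames v q.1)) < PySem.Str.len q.2
        · rw [if_pos hlt, PySem.Dict.items_insert_of_contains d q.2 hcont, hitems]
          unfold pvSpec
          rw [List.map_map]
          apply List.map_congr_left
          intro p _
          simp only [Function.comp]
          by_cases hp : p = q.1
          · subst hp
            have hlt' : (pvFm (pvNames v q.1)).length < q.2.length := by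
              simpa [PySem.Str.len] using hlt
            simp [pvNames_append, pvFm_append, hlt', PySem.Str.len]
          · simp [pvNames_append, hp, Ne.symm hp]
        · rw [if_neg hlt, hitems]
          unfold pvSpec
          apply List.map_congr_left
          intro p _
          by_cases hp : p = q.1
          · subst hp
            have hlt' : ¬ (pvFm (pvNames v q.1)).length < q.2.length := by
              simp only [PySem.Str.len] at hlt
              exact_mod_cast hlt
            simp [pvNames_append, pvFm_append, hlt', PySem.Str.len]
          · simp [pvNames_append, Ne.symm hp]
      · -- fresh pid: a new entry is appended
        have hcont : d.contains q.1 = false := by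
          rw [PySem.Dict.contains_eq_decide_mem_keys, hkeys]
          simp only [decide_eq_false_iff_not]
          intro hmemN
          exact hmem ((pvMem_pvNew v [] q.1).mp hmemN).2
        have hgd : d.getD q.1 "" = "" := PySem.Dict.getD_of_not_contains d "" hcont
        have hlt : PySem.Str.len (d.getD q.1 "") < PySem.Str.len q.2 := by
          rw [hgd]
          have := pvLen_pos_of_ne q.2 hq.2
          have hz : PySem.Str.len "" = 0 := rfl
          omega
        rw [if_pos hlt, PySem.Dict.items_insert_of_not_contains d q.2 hcont, hitems]
        unfold pvSpec
        rw [pvNew_append, if_neg (by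
          intro hor
          rcases hor with h | h
          · simp at h
          · exact hmem h), List.map_append]
        congr 1
        · apply List.map_congr_left
          intro p hp
          have hne : q.1 ≠ p := fun heq => hmem (heq ▸ ((pvMem_pvNew v [] p).mp hp).2)
          simp [pvNames_append, hne]
        · have hfm : pvFm [q.2] = q.2 := by
            have h0 := pvFm_append [] q.2
            rw [List.nil_append] at h0
            rw [h0, if_pos]
            have := pvLen_pos_of_ne q.2 hq.2
            have hz : PySem.Str.len (pvFm []) = 0 := rfl
            omega
          simp [pvNames_append, pvNames_nil v q.1 hmem, hfm]

-- B's second loop, with the state generalized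
theorem pvB_loop (v w : List (String × String)) (seen : List String)
    (out : List (List (String × String))) :
    v.foldl (fun (st : List String × List (List (String × String))) r =>
      if r.1 ∈ st.1 then st
      else (st.1 ++ [r.1],
            st.2 ++ [[("parent_id", r.1),
                      ("parent_name", pvFm ((w.filter (fun s => s.1 == r.1)).map Prod.snd))]]))
      (seen, out)
    = (seen ++ pvNew seen v,
       out ++ (pvNew seen v).map (fun p => [("parent_id", p), ("parent_name", pvFm (pvNames w p))])) := by
  induction v generalizing seen out with
  | nil => simp [pvNew]
  | cons r v ih =>
      simp only [List.foldl_cons, pvNew]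
      by_cases hm : r.1 ∈ seen
      · rw [if_pos hm, if_pos hm, ih]
      · rw [if_neg hm, if_neg hm, ih]
        simp [pvNames, List.append_assoc]

-- ===== VERDICT (by name: the statement is the Claim_ definition above) =====
theorem dedupe_parents_spec : Claim_equal_dedupe_parents := by
  intro parents _
  unfold Spec_dedupe_parents dedupe_parents dedupe_parents_alt
  simp only
  rw [pvValid_eq, pvA_fold, pvA_items (pvVR parents) (pvVR_ok parents), pvB_loop]
  unfold pvSpec
  simp [List.map_map, Function.comp]
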